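-- pv_equiv track=rewrite | github.com/Lakshikadhonchak053/HIT137CDU | season.py | guess_temp_col
-- ===== SOURCE A (Python) =====
-- def guess_temp_col(headers):
--     # heuristic: prefer columns containing 'temp' or 'temperature'
--     priority = []
--     for h in headers:
--         hl = h.lower()
--         if "temp" in hl or "temperature" in hl:
--             priority.append(h)
--     if priority:
--         return sorted(priority, key=len)[0]
--     return None
-- ===== SOURCE B (Python) =====
-- def guess_temp_col(headers):
--     # single fused scan keeping the running shortest matching header (first wins ties)
--     best = None
--     for h in headers:
--         hl = h.lower()
--         if "temp" in hl or "temperature" in hl: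
--             if best is None or len(h) < len(best):
--                 best = h
--     return best
-- ===== Notes on version B (the rewrite author's own statement) =====
-- stated objective: simpler
-- what changed: Replaces the build-a-filtered-list-then-stable-sort-and-take-head pipeline with one fused scan that maintains the running shortest matching header (strict < keeps the first of a tie, matching the stable sort).
import Mathlib
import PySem

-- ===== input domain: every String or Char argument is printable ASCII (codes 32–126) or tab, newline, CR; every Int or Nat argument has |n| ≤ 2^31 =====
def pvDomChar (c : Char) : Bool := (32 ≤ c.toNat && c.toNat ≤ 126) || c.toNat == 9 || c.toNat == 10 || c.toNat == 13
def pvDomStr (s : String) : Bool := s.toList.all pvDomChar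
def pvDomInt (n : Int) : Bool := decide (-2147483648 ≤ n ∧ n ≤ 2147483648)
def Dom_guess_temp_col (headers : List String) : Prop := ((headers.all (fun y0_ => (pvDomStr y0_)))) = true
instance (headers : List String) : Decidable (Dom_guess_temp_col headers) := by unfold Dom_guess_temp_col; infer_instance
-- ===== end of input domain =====

-- B replaces A's build-filtered-list-then-stable-sort-and-take-head with one fused scan
-- keeping the running shortest matching header (objective: simpler).


-- ===== PORT A =====
-- 'temp' in h.lower() or 'temperature' in h.lower()
def pvIsTemp (h : String) : Bool :=
  let hl := PySem.Str.lower h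
  PySem.Str.isIn "temp" hl || PySem.Str.isIn "temperature" hl

def guess_temp_col_priority (headers : List String) : List String :=
  headers.foldl (fun acc h => if pvIsTemp h then acc ++ [h] else acc) []

def guess_temp_col (headers : List String) : Option String :=
  let priority := guess_temp_col_priority headers
  if priority ≠ [] then (PySem.List.sorted priority (fun s => PySem.Str.len s)).head?
  else none

-- ===== PORT B =====
def guess_temp_col_alt_step (best : Option String) (h : String) : Option String :=
  if pvIsTemp h then
    match best with
    | none => some h
    | some b => if PySem.Str.len h < PySem.Str.len b then some h else best
  else best

def guess_temp_col_alt (headers : List String) : Option String :=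
  headers.foldl guess_temp_col_alt_step none

-- ===== PRECONDITION & SPEC =====
def Spec_guess_temp_col (headers : List String) (out : Option String) : Prop := out = guess_temp_col_alt headers
instance (headers : List String) (out : Option String) : Decidable (Spec_guess_temp_col headers out) := by unfold Spec_guess_temp_col; infer_instance

-- ===== CLAIM (what is proved, stated in full; the proofs are below) =====
def Claim_equal_guess_temp_col : Prop := ∀ (headers : List String), Dom_guess_temp_col headers → Spec_guess_temp_col headers (guess_temp_col headers)

-- ===== LEMMAS AND PROOFS =====

-- running-min step without the pvIsTemp guard
def pvMinStep (best : Option String) (h : String) : Option String :=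
  match best with
  | none => some h
  | some b => if PySem.Str.len h < PySem.Str.len b then some h else best

theorem head?_insertBy (bef : String → String → Bool) (y : String) (s : List String) :
    (PySem.List.insertBy bef y s).head? =
      some (match s with | [] => y | b :: _ => if bef y b then y else b) := by
  cases s with
  | nil => rfl
  | cons b t =>
    simp only [PySem.List.insertBy]
    split <;> simp_all

theorem head?_sorted_eq_foldl (l : List String) :
    (PySem.List.sorted l (fun s => PySem.Str.len s)).head? = l.foldl pvMinStep none := by
  induction l using List.reverseRecOn with
  | nil => rfl
  | append_singleton t y ih =>
    rw [PySem.List.sorted_eq_foldl_insertBy, List.foldl_append, List.foldl_append,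
        ← PySem.List.sorted_eq_foldl_insertBy]
    simp only [List.foldl_cons, List.foldl_nil]
    rw [head?_insertBy, ← ih]
    cases hs : PySem.List.sorted t (fun s => PySem.Str.len s) with
    | nil => simp [pvMinStep]
    | cons b u =>
      simp only [List.head?_cons, pvMinStep]
      split_ifs with h1 h2 h2 <;> simp_all
      omega

theorem alt_eq_filter_min (l : List String) :
    l.foldl guess_temp_col_alt_step none = (l.filter pvIsTemp).foldl pvMinStep none := by
  suffices h : ∀ (b : Option String), l.foldl guess_temp_col_alt_step b = (l.filter pvIsTemp).foldl pvMinStep b from h none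
  induction l with
  | nil => intro b; rfl
  | cons x t ih =>
    intro b
    by_cases hx : pvIsTemp x
    · simp [guess_temp_col_alt_step, hx, ih, pvMinStep]
    · simp [guess_temp_col_alt_step, hx, ih]

-- ===== VERDICT (by name: the statement is the Claim_ definition above) =====
theorem guess_temp_col_spec : Claim_equal_guess_temp_col := by
  intro headers _
  have hpri : guess_temp_col_priority headers = headers.filter pvIsTemp := by
    simpa using PySem.List.foldl_append_if pvIsTemp id headers []
  unfold Spec_guess_temp_col guess_temp_col guess_temp_col_alt
  rw [hpri]
  rw [alt_eq_filter_min, ← head?_sorted_eq_foldl]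
  by_cases h : headers.filter pvIsTemp = [] <;> simp [h, PySem.List.sorted]
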